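-- pv_equiv track=rewrite | github.com/jacob187/Vociferous | src/services/transcription_service.py | _normalize_sentence_casing
-- ===== SOURCE A (Python) =====
-- def _normalize_sentence_casing(text: str) -> str:
--     """Capitalize the first alphabetical character of each sentence."""
--     if not text:
--         return text
--
--     chars = list(text)
--     should_capitalize = True
--
--     for i, char in enumerate(chars):
--         if char.isalpha():
--             if should_capitalize:
--                 chars[i] = char.upper()
--                 should_capitalize = False
--             continue
--
--         if char in ".!?":
--             should_capitalize = True
--
--     return "".join(chars)
-- ===== SOURCE B (Python) =====
-- def _cap_first(chunk: str) -> str: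
--     for i, c in enumerate(chunk):
--         if c.isalpha():
--             return chunk[:i] + c.upper() + chunk[i + 1:]
--     return chunk
--
--
-- def _normalize_sentence_casing(text: str) -> str:
--     if not text:
--         return text
--     sentences = []
--     current = ""
--     for ch in text:
--         current += ch
--         if ch in ".!?":
--             sentences.append(current)
--             current = ""
--     sentences.append(current)
--     return "".join(_cap_first(s) for s in sentences)
-- ===== Notes on version B (the rewrite author's own statement) =====
-- stated objective: alternative
-- what changed: B splits the text into sentence chunks (each ending at its '.!?' delimiter), applies a pure helper that uppercases the first alphabetic character of each chunk, and joins, instead of A's single pass carrying a should_capitalize flag across the whole string.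
import Mathlib
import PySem

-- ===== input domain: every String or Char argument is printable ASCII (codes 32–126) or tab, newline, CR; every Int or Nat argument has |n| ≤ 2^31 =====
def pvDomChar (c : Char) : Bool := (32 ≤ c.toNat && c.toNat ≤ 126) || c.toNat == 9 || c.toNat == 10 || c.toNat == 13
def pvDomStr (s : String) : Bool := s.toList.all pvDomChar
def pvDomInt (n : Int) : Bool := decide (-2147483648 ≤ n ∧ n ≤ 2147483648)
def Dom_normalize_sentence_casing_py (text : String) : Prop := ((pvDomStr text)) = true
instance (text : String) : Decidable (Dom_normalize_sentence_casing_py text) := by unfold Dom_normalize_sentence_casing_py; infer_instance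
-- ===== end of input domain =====

-- B re-decomposes A's single stateful pass as split-into-sentences, capitalize each chunk's first letter, join (alternative decomposition, same cost).

-- ===== PORT A =====
-- the enumerate loop mutating `chars` with the should_capitalize flag, as structural recursion carrying the flag
def pvLoopA : List Char → Bool → List Char
  | [], _ => []
  | c :: rest, b =>
      if PySem.Chars.isalpha c then
        if b then PySem.Chars.upperChar c :: pvLoopA rest false
        else c :: pvLoopA rest b
      else if c == '.' || c == '!' || c == '?' then c :: pvLoopA rest true
      else c :: pvLoopA rest b

def normalize_sentence_casing_py (text : String) : String :=
  if text == "" then text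
  else String.mk (pvLoopA text.toList true)

-- ===== PORT B =====
-- _cap_first: uppercase the first alphabetic character, leave everything else
def pvCapFirst : List Char → List Char
  | [] => []
  | c :: cs => if PySem.Chars.isalpha c then PySem.Chars.upperChar c :: cs else c :: pvCapFirst cs

-- the split loop of B: accumulate `current`, cut after each '.'/'!'/'?'
def pvSplitSent : List Char → List Char → List (List Char)
  | [], cur => [cur]
  | c :: rest, cur =>
      let cur' := cur ++ [c]
      if c == '.' || c == '!' || c == '?' then cur' :: pvSplitSent rest []
      else pvSplitSent rest cur'

def normalize_sentence_casing_py_alt (text : String) : String :=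
  if text == "" then text
  else String.mk (((pvSplitSent text.toList []).map pvCapFirst).flatten)

-- ===== PRECONDITION & SPEC =====
def Spec_normalize_sentence_casing_py (text : String) (out : String) : Prop := out = normalize_sentence_casing_py_alt text
instance (text : String) (out : String) : Decidable (Spec_normalize_sentence_casing_py text out) := by unfold Spec_normalize_sentence_casing_py; infer_instance

-- ===== CLAIM (what is proved, stated in full; the proofs are below) =====
def Claim_equal_normalize_sentence_casing_py : Prop := ∀ (text : String), Dom_normalize_sentence_casing_py text → Spec_normalize_sentence_casing_py text (normalize_sentence_casing_py text)

-- ===== LEMMAS AND PROOFS =====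

theorem capFirst_noalpha (xs : List Char) (h : xs.any PySem.Chars.isalpha = false) :
    pvCapFirst xs = xs := by
  induction xs with
  | nil => rfl
  | cons x t ih =>
      simp only [List.any_cons, Bool.or_eq_false_iff] at h
      simp [pvCapFirst, h.1, ih h.2]

theorem capFirst_append_nonalpha (xs : List Char) (c : Char)
    (h : PySem.Chars.isalpha c = false) :
    pvCapFirst (xs ++ [c]) = pvCapFirst xs ++ [c] := by
  induction xs with
  | nil => simp [pvCapFirst, h]
  | cons x t ih =>
      by_cases hx : PySem.Chars.isalpha x = true
      · simp [pvCapFirst, hx]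
      · simp only [Bool.not_eq_true] at hx
        simp [pvCapFirst, hx, ih]

theorem capFirst_append_alpha (xs : List Char) (c : Char)
    (hxs : xs.any PySem.Chars.isalpha = false) (hc : PySem.Chars.isalpha c = true) :
    pvCapFirst (xs ++ [c]) = xs ++ [PySem.Chars.upperChar c] := by
  induction xs with
  | nil => simp [pvCapFirst, hc]
  | cons x t ih =>
      simp only [List.any_cons, Bool.or_eq_false_iff] at hxs
      simp [pvCapFirst, hxs.1, ih hxs.2]

theorem capFirst_append_hasalpha (xs : List Char) (c : Char)
    (hxs : xs.any PySem.Chars.isalpha = true) :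
    pvCapFirst (xs ++ [c]) = pvCapFirst xs ++ [c] := by
  induction xs with
  | nil => simp at hxs
  | cons x t ih =>
      by_cases hx : PySem.Chars.isalpha x = true
      · simp [pvCapFirst, hx]
      · simp only [Bool.not_eq_true] at hx
        simp only [List.any_cons, hx, Bool.false_or] at hxs
        simp [pvCapFirst, hx, ih hxs]

theorem alpha_not_delim (c : Char) (h : PySem.Chars.isalpha c = true) :
    (c == '.' || c == '!' || c == '?') = false := by
  by_contra hd
  simp only [Bool.not_eq_false, Bool.or_eq_true, beq_iff_eq] at hd
  rcases hd with (hc | hc) | hc <;> subst hc <;> exact absurd h (by decide)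

theorem main_equiv (cs : List Char) : ∀ cur : List Char,
    ((pvSplitSent cs cur).map pvCapFirst).flatten =
      pvCapFirst cur ++ pvLoopA cs (!cur.any PySem.Chars.isalpha) := by
  induction cs with
  | nil => intro cur; simp [pvSplitSent, pvLoopA]
  | cons c rest ih =>
      intro cur
      by_cases ha : PySem.Chars.isalpha c = true
      · have hd := alpha_not_delim c ha
        simp only [pvSplitSent, hd, Bool.false_eq_true, if_false, pvLoopA, ha, if_true]
        rw [ih]
        simp only [List.any_append, List.any_cons, ha, List.any_nil]
        by_cases hcur : cur.any PySem.Chars.isalpha = true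
        · rw [capFirst_append_hasalpha cur c hcur]
          simp [hcur]
        · simp only [Bool.not_eq_true] at hcur
          rw [capFirst_append_alpha cur c hcur ha, capFirst_noalpha cur hcur]
          simp [hcur]
      · simp only [Bool.not_eq_true] at ha
        by_cases hd : (c == '.' || c == '!' || c == '?') = true
        · simp only [pvSplitSent, hd, if_true, pvLoopA, ha]
          simp only [List.map_cons, List.flatten_cons]
          rw [ih []]
          rw [capFirst_append_nonalpha cur c ha]
          simp [pvCapFirst]
        · simp only [Bool.not_eq_true] at hd
          simp only [pvSplitSent, hd, Bool.false_eq_true, if_false, pvLoopA, ha]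
          rw [ih]
          rw [capFirst_append_nonalpha cur c ha]
          simp [ha]

-- ===== VERDICT (by name: the statement is the Claim_ definition above) =====
theorem normalize_sentence_casing_py_spec : Claim_equal_normalize_sentence_casing_py := by
  intro text _
  unfold Spec_normalize_sentence_casing_py normalize_sentence_casing_py normalize_sentence_casing_py_alt
  by_cases h : text == ""
  · simp [h]
  · simp only [h]
    rw [main_equiv]
    simp [pvCapFirst]
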